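-- pv_equiv track=rewrite | github.com/lucianTrepteanu/Artificial-Intelligence | Blocks_problem/block_problem.py | compute_heuristic_maxlen
-- ===== SOURCE A (Python) =====
-- def good_stack(stack):
--     temp_dict={}
--     if len(stack)<1: #daca stiva nu are cel putin 2 elemente
--         return True
--
--     string1=stack[0] #facem un dictionar cu aparitiile literelor in primul cuvant (frecvente)
--     for i in range(len(string1)):
--         ch=string1[i]
--         if ch in temp_dict:
--             temp_dict[ch]=temp_dict[ch]+1
--         else:
--             temp_dict[ch]=1
--
--     for string in stack[1:]: #pentru celelalte cuvinte facem un dictionar cu frecventele literelor si compara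
--         new_dict={}
--         for i in range(len(string)):
--             ch=string[i]
--             if ch in new_dict:
--                 new_dict[ch]=new_dict[ch]+1
--             else:
--                 new_dict[ch]=1
--
--         if temp_dict != new_dict: #daca are alt multiset de litere nu e anagrama si stiva nu poate face parte din stare finala
--             return False
--
--     return True
--
-- def compute_heuristic_maxlen(state):
--     result=0
--     max_len=0
--     for stack in state: #calculam lungimea maxima a unui string din stare (indiferent de stiva)
--         for string in stack:
--             if len(string)>max_len:
--                 max_len=len(string)
--
--     for stack in state:
--         for i in range(len(stack)-1):
--             test=[]
--             test.append(stack[i])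
--             test.append(stack[i+1])
--             if good_stack(test)==True:
--                 break
--             result+=(i+1)*max_len
--
--     return result
-- ===== SOURCE B (Python) =====
-- def compute_heuristic_maxlen(state):
--     max_len = max((len(s) for stack in state for s in stack), default=0)
--     total = 0
--     for stack in state:
--         sigs = [sorted(s) for s in stack]
--         k = next((j for j, (a, b) in enumerate(zip(sigs, sigs[1:])) if a == b),
--                  len(stack) - 1)
--         total += max_len * (k * (k + 1) // 2)
--     return total
-- ===== Notes on version B (the rewrite author's own statement) =====
-- stated objective: simpler
-- what changed: B replaces A's per-pair letter-frequency dictionaries and break-and-accumulate inner loop by a canonical sorted-characters signature, a single scan for the first adjacent anagram pair (index k), and the closed-form contribution max_len * k*(k+1)//2 per stack, with max_len computed by one max over the flattened lengths.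
import Mathlib
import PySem

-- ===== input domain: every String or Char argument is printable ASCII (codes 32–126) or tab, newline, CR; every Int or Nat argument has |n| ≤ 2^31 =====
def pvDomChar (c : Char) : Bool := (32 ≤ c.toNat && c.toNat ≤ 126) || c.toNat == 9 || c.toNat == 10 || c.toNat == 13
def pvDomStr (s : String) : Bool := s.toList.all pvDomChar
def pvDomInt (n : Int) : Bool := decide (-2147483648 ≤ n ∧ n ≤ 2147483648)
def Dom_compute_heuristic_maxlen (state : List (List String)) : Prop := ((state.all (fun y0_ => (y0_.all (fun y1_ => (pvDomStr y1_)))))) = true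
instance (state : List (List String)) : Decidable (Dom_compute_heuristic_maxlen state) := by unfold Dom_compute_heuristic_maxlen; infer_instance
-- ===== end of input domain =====

-- B replaces A's break-and-accumulate inner loop by the index k of the first adjacent
-- anagram pair (canonical sorted signature instead of letter-frequency dicts) and the
-- closed-form contribution max_len * k*(k+1)//2; objective: simpler.

-- ===== PORT A =====
-- Python dict `==` compares the key→value mapping ignoring insertion order; this helper
-- ports `temp_dict != new_dict` exactly (values looked up only on contained keys).
def pvDictEq (d d' : PySem.Dict Char Int) : Bool :=
  (d.keys.all (fun k => d'.contains k && (d.getD k 0 == d'.getD k 0))) &&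
  (d'.keys.all (fun k => d.contains k))

-- the letter-frequency loop of good_stack (`for i in range(len(string)): ch=string[i] …`);
-- string indexing yields the character, ported via pyGetD on toList (exact: i is in range)
def pvFreq (s : String) : PySem.Dict Char Int :=
  (PySem.List.pyRange 0 (PySem.Str.len s) 1).foldl
    (fun d i =>
      let ch := PySem.List.pyGetD s.toList i ' '
      if d.contains ch then d.insert ch (d.getD ch 0 + 1) else d.insert ch 1)
    PySem.Dict.empty

def good_stack (stack : List String) : Bool :=
  if (stack.length : Int) < 1 then true
  else
    let temp := pvFreq (PySem.List.pyGetD stack 0 "")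
    -- `for string in stack[1:]: … if temp_dict != new_dict: return False` / final `return True`
    (PySem.List.slice stack (some 1) none).all (fun s => pvDictEq temp (pvFreq s))

-- A's inner `for i in range(len(stack)-1)` with break, accumulating into result
def pvInnerA (stack : List String) (maxLen : Int) : List Int → Int → Int
  | [], result => result
  | i :: rest, result =>
    let test := [PySem.List.pyGetD stack i "", PySem.List.pyGetD stack (i + 1) ""]
    if good_stack test then result
    else pvInnerA stack maxLen rest (result + (i + 1) * maxLen)

def compute_heuristic_maxlen (state : List (List String)) : Int :=
  let maxLen := state.foldl
    (fun m stack => stack.foldl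
      (fun m s => if PySem.Str.len s > m then PySem.Str.len s else m) m) 0
  state.foldl
    (fun result stack =>
      pvInnerA stack maxLen (PySem.List.pyRange 0 ((stack.length : Int) - 1) 1) result) 0

-- ===== PORT B =====
-- sorted(s): the canonical anagram signature
def pvSig (s : String) : List Char := PySem.List.sorted s.toList (fun c => c) false

def compute_heuristic_maxlen_alt (state : List (List String)) : Int :=
  let maxLen := PySem.List.maxD
    (state.flatMap (fun stack => stack.map (fun s => PySem.Str.len s))) (fun x => x) 0
  state.foldl
    (fun total stack =>
      let sigs := stack.map pvSig
      let k : Int :=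
        match (sigs.zip sigs.tail).findIdx? (fun p => p.1 == p.2) with
        | some j => (j : Int)
        | none => (stack.length : Int) - 1
      total + maxLen * PySem.Int.floordiv (k * (k + 1)) 2) 0

-- ===== PRECONDITION & SPEC =====
def Spec_compute_heuristic_maxlen (state : List (List String)) (out : Int) : Prop := out = compute_heuristic_maxlen_alt state
instance (state : List (List String)) (out : Int) : Decidable (Spec_compute_heuristic_maxlen state out) := by unfold Spec_compute_heuristic_maxlen; infer_instance

-- ===== CLAIM (what is proved, stated in full; the proofs are below) =====
def Claim_equal_compute_heuristic_maxlen : Prop := ∀ (state : List (List String)), Dom_compute_heuristic_maxlen state → Spec_compute_heuristic_maxlen state (compute_heuristic_maxlen state)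

-- ===== LEMMAS AND PROOFS =====

def pvTri (k : Nat) : Nat := k * (k + 1) / 2

lemma pvTri_succ (j : Nat) : pvTri (j + 1) = pvTri j + (j + 1) := by
  unfold pvTri
  have h1 : 2 ∣ j * (j + 1) := (Nat.even_mul_succ_self j).two_dvd
  have h2 : 2 ∣ (j + 1) * (j + 1 + 1) := (Nat.even_mul_succ_self (j+1)).two_dvd
  have h3 : (j + 1) * (j + 1 + 1) = j * (j + 1) + 2 * (j + 1) := by ring
  omega

lemma step_eq (d : PySem.Dict Char Int) (ch : Char) :
    (if d.contains ch then d.insert ch (d.getD ch 0 + 1) else d.insert ch 1) =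
      d.insert ch (d.getD ch 0 + 1) := by
  by_cases h : d.contains ch
  · simp [h]
  · simp only [Bool.not_eq_true] at h
    simp [h, PySem.Dict.getD_of_not_contains d 0 h]

lemma pvFreq'_eq (l : List Char) :
    l.foldl (fun d ch => if d.contains ch then d.insert ch (d.getD ch 0 + 1) else d.insert ch 1)
      PySem.Dict.empty = PySem.Dict.counter l := by
  rw [show (fun (d : PySem.Dict Char Int) ch => if d.contains ch then d.insert ch (d.getD ch 0 + 1) else d.insert ch 1) = (fun d ch => d.insert ch (d.getD ch 0 + 1)) from funext fun d => funext fun ch => step_eq d ch]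
  exact PySem.Dict.foldl_insert_getD_add_one_eq_counter l



lemma pvFreq_eq_counter (s : String) : pvFreq s = PySem.Dict.counter s.toList := by
  unfold pvFreq
  simp only []
  rw [PySem.Str.len_eq]
  have h := PySem.List.foldl_pyRange_zero_pyGetD' s.toList ' '
      (fun (d : PySem.Dict Char Int) ch => if d.contains ch then d.insert ch (d.getD ch 0 + 1) else d.insert ch 1)
      PySem.Dict.empty
  exact h.trans (pvFreq'_eq s.toList)

lemma pvDictEq_counter_iff (a b : List Char) :
    pvDictEq (PySem.Dict.counter a) (PySem.Dict.counter b) = true ↔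
      ∀ c, a.count c = b.count c := by
  unfold pvDictEq
  simp only [Bool.and_eq_true, List.all_eq_true, PySem.Dict.keys_counter,
    PySem.Dict.contains_counter, PySem.Dict.getD_counter, PySem.Set.mem_ofList,
    beq_iff_eq, Nat.cast_inj, List.contains_eq_mem, decide_eq_true_eq]
  constructor
  · rintro ⟨h1, h2⟩ c
    by_cases hc : c ∈ a
    · exact ((h1 c hc).2)
    · by_cases hcb : c ∈ b
      · exact absurd (h2 c hcb) hc
      · rw [List.count_eq_zero_of_not_mem hc, List.count_eq_zero_of_not_mem hcb]
  · intro h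
    refine ⟨fun c hc => ⟨?_, h c⟩, fun c hc => ?_⟩
    · have := h c
      have := List.count_pos_iff.mpr hc
      exact List.count_pos_iff.mp (by omega)
    · have := List.count_pos_iff.mpr hc
      have := h c
      exact List.count_pos_iff.mp (by omega)



lemma pvSig_eq_iff (x y : String) : pvSig x = pvSig y ↔ x.toList.Perm y.toList := by
  constructor
  · intro h
    have h1 := PySem.List.sorted_perm x.toList (fun c => c) false
    rw [show PySem.List.sorted x.toList (fun c => c) false = pvSig x from rfl, h] at h1
    exact h1.symm.trans (PySem.List.sorted_perm y.toList (fun c => c) false)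
  · intro h
    unfold pvSig
    exact (PySem.List.sorted_id_eq_of_perm_of_pairwise y.toList (PySem.List.sorted x.toList (fun c => c) false)
      ((PySem.List.sorted_perm x.toList (fun c => c) false).trans h)
      (PySem.List.sorted_pairwise x.toList (fun c => c))).symm

lemma good_stack_pair (x y : String) : good_stack [x, y] = (pvSig x == pvSig y) := by
  have hgs : good_stack [x, y] = pvDictEq (pvFreq x) (pvFreq y) := by
    unfold good_stack
    norm_num [PySem.List.slice_from_natCast ([x,y]) 1, PySem.List.pyGetD_zero_cons]
    rw [show PySem.List.slice [x, y] (some 1) none = [y] from PySem.List.slice_from_natCast ([x,y]) 1]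
    simp
  rw [hgs, pvFreq_eq_counter, pvFreq_eq_counter]
  by_cases hp : x.toList.Perm y.toList
  · rw [pvDictEq_counter_iff .. |>.mpr (fun c => hp.count_eq c)]
    simp [((pvSig_eq_iff x y).mpr hp)]
  · have h1 : ¬ (∀ c, x.toList.count c = y.toList.count c) := fun h => hp (List.perm_iff_count.mpr h)
    have h2 : pvDictEq (PySem.Dict.counter x.toList) (PySem.Dict.counter y.toList) ≠ true := fun h => h1 ((pvDictEq_counter_iff ..).mp h)
    have h3 : pvSig x ≠ pvSig y := fun h => hp ((pvSig_eq_iff x y).mp h)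
    simp [Bool.eq_false_iff.mpr h2, h3]


def pvFirst (g : Int → Bool) (j c : Nat) : Nat :=
  if _h : j < c then (if g j then j else pvFirst g (j + 1) c) else c
termination_by c - j

lemma pvInnerA_eq (stack : List String) (m : Int) :
    ∀ (d j : Nat) (r : Int),
      pvInnerA stack m (PySem.List.pyRange (j : Int) ((j + d : Nat) : Int) 1) r =
        r + m * ((pvTri (pvFirst
            (fun i => good_stack [PySem.List.pyGetD stack i "", PySem.List.pyGetD stack (i + 1) ""])
            j (j + d)) : Int) - (pvTri j : Int)) := by
  intro d
  induction d with
  | zero =>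
    intro j r
    rw [PySem.List.pyRange_one_eq_nil (by omega)]
    rw [show pvFirst _ j (j + 0) = j by unfold pvFirst; simp]
    simp [pvInnerA]
  | succ d ih =>
    intro j r
    rw [PySem.List.pyRange_one_cons (by push_cast; omega)]
    show (if good_stack [PySem.List.pyGetD stack (j:Int) "", PySem.List.pyGetD stack ((j:Int) + 1) ""] then r
      else pvInnerA stack m (PySem.List.pyRange ((j:Int)+1) ((j + (d+1) : Nat) : Int) 1) (r + ((j:Int) + 1) * m)) = _
    by_cases hg : good_stack [PySem.List.pyGetD stack (j:Int) "", PySem.List.pyGetD stack ((j:Int) + 1) ""]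
    · rw [if_pos hg]
      rw [show pvFirst _ j (j + (d+1)) = j by
        unfold pvFirst; rw [dif_pos (by omega), if_pos hg]]
      ring
    · rw [if_neg hg]
      have hcast : ((j:Int) + 1) = ((j + 1 : Nat) : Int) := by push_cast; ring
      have harg : (j + (d + 1)) = ((j + 1) + d) := by omega
      rw [hcast, harg, ih (j+1) (r + ((j + 1 : Nat) : Int) * m)]
      rw [show pvFirst _ j ((j+1) + d) = pvFirst _ (j+1) ((j+1)+d) by
        rw [pvFirst]; rw [dif_pos (by omega), if_neg hg]]
      rw [pvTri_succ j]
      push_cast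
      ring

lemma pvFirst_eq_findIdx {α : Type} (q : α → Bool) (g : Int → Bool) :
    ∀ (l : List α) (j : Nat),
      (∀ t (ht : t < l.length), g ((j : Int) + t) = q l[t]) →
      pvFirst g j (j + l.length) = j + ((l.findIdx? q).getD l.length) := by
  intro l
  induction l with
  | nil => intro j h; unfold pvFirst; simp
  | cons x xs ih =>
    intro j h
    have hx : g (j : Int) = q x := by
      have := h 0 (by simp)
      simpa using this
    rw [pvFirst, dif_pos (by simp)]
    by_cases hq : q x = true
    · rw [if_pos (by rw [hx, hq])]
      simp [List.findIdx?_cons, hq]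
    · rw [if_neg (by rw [hx]; simp [hq])]
      have harg : j + (x :: xs).length = (j + 1) + xs.length := by simp; omega
      rw [harg, ih (j + 1) (fun t ht => by
        have h2 := h (t + 1) (by simpa using Nat.succ_lt_succ ht)
        simp only [List.getElem_cons_succ] at h2
        rw [← h2]
        congr 1
        push_cast
        ring)]
      simp only [List.findIdx?_cons, hq, List.length_cons]
      cases xs.findIdx? q with
      | none => simp; omega
      | some t => simp; omega

lemma pvTri_cast_floordiv (k : Nat) :
    (pvTri k : Int) = PySem.Int.floordiv ((k : Int) * ((k : Int) + 1)) 2 := by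
  have h : ((k : Int) * ((k : Int) + 1)) = ((k * (k + 1) : Nat) : Int) := by push_cast; ring
  rw [h, show ((2:Int)) = ((2:Nat):Int) from rfl, PySem.Int.floordiv_natCast]
  rfl

lemma pvStack_contrib (stack : List String) (m r : Int) :
    pvInnerA stack m (PySem.List.pyRange 0 ((stack.length : Int) - 1) 1) r =
      r + m * PySem.Int.floordiv
        ((match ((stack.map pvSig).zip (stack.map pvSig).tail).findIdx? (fun p => p.1 == p.2) with
          | some j => (j : Int)
          | none => (stack.length : Int) - 1) *
         ((match ((stack.map pvSig).zip (stack.map pvSig).tail).findIdx? (fun p => p.1 == p.2) with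
          | some j => (j : Int)
          | none => (stack.length : Int) - 1) + 1)) 2 := by
  rcases stack with _ | ⟨s0, rest⟩
  · rw [PySem.List.pyRange_one_eq_nil (by norm_num)]
    simp [pvInnerA]
  · set stack := s0 :: rest with hstack
    have hn : 1 ≤ stack.length := by simp [hstack]
    set c : Nat := stack.length - 1 with hc
    have hcast : ((stack.length : Int) - 1) = ((c : Nat) : Int) := by omega
    have h1 := pvInnerA_eq stack m c 0 r
    rw [Nat.zero_add, Nat.cast_zero] at h1
    rw [hcast, h1]
    set pairs := ((stack.map pvSig).zip (stack.map pvSig).tail) with hpairs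
    have hplen : pairs.length = c := by
      simp [hpairs, List.length_zip]
      omega
    have hmatch : ∀ t (ht : t < pairs.length),
        (fun i => good_stack [PySem.List.pyGetD stack i "", PySem.List.pyGetD stack (i + 1) ""])
          (((0:Nat) : Int) + t) = (fun (p : List Char × List Char) => p.1 == p.2) pairs[t] := by
      intro t ht
      have ht' : t < stack.length - 1 := by omega
      have ht1 : t < stack.length := by omega
      have ht2 : t + 1 < stack.length := by omega
      simp only [Nat.cast_zero, zero_add]
      have e2 : (((t : Nat) : Int) + 1) = (((t + 1 : Nat)) : Int) := by push_cast; ring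
      rw [e2, PySem.List.pyGetD_natCast, PySem.List.pyGetD_natCast,
        List.getD_eq_getElem stack "" ht1, List.getD_eq_getElem stack "" ht2]
      have hp : pairs[t] = (pvSig stack[t], pvSig stack[t + 1]) := by
        simp only [hpairs, List.getElem_zip, List.getElem_tail, List.getElem_map]
      rw [hp]
      exact good_stack_pair _ _
    have h2 := pvFirst_eq_findIdx (fun (p : List Char × List Char) => p.1 == p.2)
      (fun i => good_stack [PySem.List.pyGetD stack i "", PySem.List.pyGetD stack (i + 1) ""])
      pairs 0 hmatch
    rw [Nat.zero_add, hplen] at h2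
    rw [h2]
    cases hfi : pairs.findIdx? (fun p => p.1 == p.2) with
    | some t =>
      simp only [Option.getD_some]
      rw [Nat.zero_add, show pvTri 0 = 0 from rfl]
      rw [pvTri_cast_floordiv t]
      push_cast
      ring
    | none =>
      simp only [Option.getD_none]
      rw [Nat.zero_add, show pvTri 0 = 0 from rfl]
      rw [pvTri_cast_floordiv c]
      push_cast
      ring

lemma pvFold_max_nonneg (l : List Int) (h : ∀ x ∈ l, 0 ≤ x) :
    PySem.List.maxD l (fun x => x) 0 = l.foldl max 0 := by
  cases l with
  | nil => rfl
  | cons x t =>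
    unfold PySem.List.maxD
    rw [PySem.List.max?_id_cons]
    simp only [Option.getD_some, List.foldl_cons]
    rw [max_eq_right (h x (by simp))]

lemma pvMaxLen_eq (state : List (List String)) :
    state.foldl (fun m stack => stack.foldl
      (fun m s => if PySem.Str.len s > m then PySem.Str.len s else m) m) 0 =
    PySem.List.maxD
      (state.flatMap (fun stack => stack.map (fun s => PySem.Str.len s))) (fun x => x) 0 := by
  have hstep : (fun (m : Int) (s : String) => if PySem.Str.len s > m then PySem.Str.len s else m) =
      (fun m s => max m (PySem.Str.len s)) := by
    funext m s
    rcases le_or_gt (PySem.Str.len s) m with h | h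
    · rw [if_neg (by omega), max_eq_left h]
    · rw [if_pos (by omega), max_eq_right h.le]
  rw [pvFold_max_nonneg _ (by
    intro x hx
    rw [List.mem_flatMap] at hx
    obtain ⟨st, _, hx⟩ := hx
    rw [List.mem_map] at hx
    obtain ⟨s, _, rfl⟩ := hx
    rw [PySem.Str.len_eq]
    exact Int.natCast_nonneg _)]
  rw [show state.flatMap (fun stack => stack.map (fun s => PySem.Str.len s)) =
      (state.map (fun stack => stack.map (fun s => PySem.Str.len s))).flatten from by
    simp [List.flatMap_def]]
  rw [List.foldl_flatten, List.foldl_map]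
  simp only [List.foldl_map, hstep]

-- ===== VERDICT (by name: the statement is the Claim_ definition above) =====
theorem compute_heuristic_maxlen_spec : Claim_equal_compute_heuristic_maxlen := by
  intro state _
  show compute_heuristic_maxlen state = compute_heuristic_maxlen_alt state
  unfold compute_heuristic_maxlen compute_heuristic_maxlen_alt
  simp only []
  rw [pvMaxLen_eq state]
  have hf : (fun (result : Int) stack =>
      pvInnerA stack (PySem.List.maxD
        (state.flatMap (fun stack => stack.map (fun s => PySem.Str.len s))) (fun x => x) 0)
        (PySem.List.pyRange 0 ((stack.length : Int) - 1) 1) result) =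
      (fun (total : Int) stack =>
        total + (PySem.List.maxD
          (state.flatMap (fun stack => stack.map (fun s => PySem.Str.len s))) (fun x => x) 0) *
          PySem.Int.floordiv
            ((match ((stack.map pvSig).zip (stack.map pvSig).tail).findIdx? (fun p => p.1 == p.2) with
              | some j => (j : Int)
              | none => (stack.length : Int) - 1) *
             ((match ((stack.map pvSig).zip (stack.map pvSig).tail).findIdx? (fun p => p.1 == p.2) with
              | some j => (j : Int)
              | none => (stack.length : Int) - 1) + 1)) 2) := by
    funext r stack
    exact pvStack_contrib stack _ r
  rw [hf]
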